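-- pv_equiv track=rewrite | github.com/adowsky/kck | lab4/notes_finder.py | _close_contour_in_square
-- ===== SOURCE A (Python) =====
-- def _close_contour_in_square(contour):
--     x_max, x_min, y_max, y_min = contour[0][0][0], contour[0][0][0], contour[0][0][1], contour[0][0][1]
--     for vertex in contour:
--         x_max = vertex[0][0] if vertex[0][0] > x_max else x_max
--         y_max = vertex[0][1] if vertex[0][1] > y_max else y_max
--         x_min = vertex[0][0] if vertex[0][0] < x_min else x_min
--         y_min = vertex[0][1] if vertex[0][1] < y_min else y_min
--     return y_max, x_max, y_min, x_min
-- ===== SOURCE B (Python) =====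
-- def _close_contour_in_square(contour):
--     xs = [vertex[0][0] for vertex in contour]
--     ys = [vertex[0][1] for vertex in contour]
--     return max(ys), max(xs), min(ys), min(xs)
-- ===== Notes on version B (the rewrite author's own statement) =====
-- stated objective: idiomatic
-- what changed: Replace the single fused running-min/max loop seeded from contour[0] by building the x and y coordinate lists and reducing them with the built-ins max()/min().
-- outside the precondition, e.g. on _close_contour_in_square([]): A raises IndexError, B raises ValueError; on _close_contour_in_square([[[1]]]): A raises IndexError, B raises IndexError
import Mathlib
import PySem

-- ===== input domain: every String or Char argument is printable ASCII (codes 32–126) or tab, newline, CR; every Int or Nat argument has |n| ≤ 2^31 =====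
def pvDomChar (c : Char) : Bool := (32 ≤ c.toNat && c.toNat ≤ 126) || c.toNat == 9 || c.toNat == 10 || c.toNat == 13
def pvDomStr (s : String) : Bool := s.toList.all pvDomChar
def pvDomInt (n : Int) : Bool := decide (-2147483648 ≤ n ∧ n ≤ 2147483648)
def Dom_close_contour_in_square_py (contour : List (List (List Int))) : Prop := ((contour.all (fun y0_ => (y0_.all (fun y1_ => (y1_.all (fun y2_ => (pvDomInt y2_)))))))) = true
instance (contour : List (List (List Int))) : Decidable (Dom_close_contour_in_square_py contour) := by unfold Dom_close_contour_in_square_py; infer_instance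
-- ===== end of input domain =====

-- B builds the x/y coordinate lists and reduces them with max()/min() instead of A's fused running-min/max loop (idiomatic; same cost).


-- ===== PORT A =====
-- vertex[0][i] (and contour[0][0][i]); total via getD, exact wherever Pre_ holds (indices in range)
def pvVert (v : List (List Int)) (i : Int) : Int :=
  (PySem.List.pyGet? ((PySem.List.pyGet? v 0).getD []) i).getD 0

def close_contour_in_square_py (contour : List (List (List Int))) : Int × Int × Int × Int :=
  let v0 := (PySem.List.pyGet? contour 0).getD []
  let s := contour.foldl (fun (s : Int × Int × Int × Int) vertex =>
      let xM := if pvVert vertex 0 > s.1 then pvVert vertex 0 else s.1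
      let yM := if pvVert vertex 1 > s.2.1 then pvVert vertex 1 else s.2.1
      let xm := if pvVert vertex 0 < s.2.2.1 then pvVert vertex 0 else s.2.2.1
      let ym := if pvVert vertex 1 < s.2.2.2 then pvVert vertex 1 else s.2.2.2
      (xM, yM, xm, ym))
    (pvVert v0 0, pvVert v0 1, pvVert v0 0, pvVert v0 1)
  (s.2.1, s.1, s.2.2.2, s.2.2.1)

-- ===== PORT B =====
def close_contour_in_square_py_alt (contour : List (List (List Int))) : Int × Int × Int × Int :=
  let xs := contour.map (fun v => pvVert v 0)
  let ys := contour.map (fun v => pvVert v 1)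
  ((PySem.List.max? ys (fun y => y)).getD 0,
   (PySem.List.max? xs (fun y => y)).getD 0,
   (PySem.List.min? ys (fun y => y)).getD 0,
   (PySem.List.min? xs (fun y => y)).getD 0)

-- ===== PRECONDITION & SPEC =====
-- Pre_ excludes inputs on which A raises IndexError: an empty contour, or a vertex whose
-- first row is missing or shorter than 2 (contour[0][0][0] / vertex[0][1] out of range).
def Pre_close_contour_in_square_py (contour : List (List (List Int))) : Prop :=
  contour ≠ [] ∧ ∀ v ∈ contour, v ≠ [] ∧ 2 ≤ (v.headD []).length
instance (contour : List (List (List Int))) : Decidable (Pre_close_contour_in_square_py contour) := by unfold Pre_close_contour_in_square_py; infer_instance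

def pvWitness_close_contour_in_square_py : List (List (List Int)) := [[[3, 7]], [[1, -2]]]

def Spec_close_contour_in_square_py (contour : List (List (List Int))) (out : Int × Int × Int × Int) : Prop := out = close_contour_in_square_py_alt contour
instance (contour : List (List (List Int))) (out : Int × Int × Int × Int) : Decidable (Spec_close_contour_in_square_py contour out) := by unfold Spec_close_contour_in_square_py; infer_instance

-- ===== CLAIM (what is proved, stated in full; the proofs are below) =====
def Claim_equal_close_contour_in_square_py : Prop := ∀ (contour : List (List (List Int))), Dom_close_contour_in_square_py contour → Pre_close_contour_in_square_py contour → Spec_close_contour_in_square_py contour (close_contour_in_square_py contour)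

-- ===== LEMMAS AND PROOFS =====
theorem pv_if_gt (a x : Int) : (if x > a then x else a) = max a x := by
  rw [max_def]; split <;> split <;> omega

theorem pv_if_lt (a x : Int) : (if x < a then x else a) = min a x := by
  rw [min_def]; split <;> split <;> omega

-- A's fused loop computes the four componentwise foldl max/min of the mapped coordinate lists.
theorem pv_fold4 (t : List (List (List Int))) (a b c d : Int) :
    t.foldl (fun (s : Int × Int × Int × Int) vertex =>
      (max s.1 (pvVert vertex 0), max s.2.1 (pvVert vertex 1),
       min s.2.2.1 (pvVert vertex 0), min s.2.2.2 (pvVert vertex 1))) (a, b, c, d)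
    = ((t.map (fun v => pvVert v 0)).foldl max a,
       (t.map (fun v => pvVert v 1)).foldl max b,
       (t.map (fun v => pvVert v 0)).foldl min c,
       (t.map (fun v => pvVert v 1)).foldl min d) := by
  induction t generalizing a b c d with
  | nil => rfl
  | cons v t ih =>
    simp only [List.foldl_cons, List.map_cons]
    exact ih _ _ _ _

-- ===== VERDICT (by name: the statement is the Claim_ definition above) =====
theorem close_contour_in_square_py_spec : Claim_equal_close_contour_in_square_py := by
  intro contour _ hpre
  unfold Spec_close_contour_in_square_py close_contour_in_square_py close_contour_in_square_py_alt
  obtain ⟨hne, -⟩ := hpre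
  obtain ⟨v, t, rfl⟩ := List.exists_cons_of_ne_nil hne
  simp only [List.map_cons, PySem.List.max?_id_cons, PySem.List.min?_id_cons, Option.getD_some]
  have h0 : (PySem.List.pyGet? (v :: t) (0 : Int)).getD [] = v := by
    simp [PySem.List.pyGet?, PySem.List.pyIdx?]
  rw [h0]
  simp only [pv_if_gt, pv_if_lt, gt_iff_lt, List.foldl_cons,
    max_self, min_self]
  rw [pv_fold4]
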